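-- pv_equiv track=rewrite | github.com/c10q/algorithm | python/programmers/bucketplace/test_1.py | solution
-- ===== SOURCE A (Python) =====
-- def solution(path):
--     answer = []
--     route = [[]]
--     route_turn = [path[0]]
--     d_map = {
--         "E": {
--             "S": "right",
--             "N": "left"
--         },
--         "W": {
--             "N": "right",
--             "S": "left"
--         },
--         "S": {
--             "W": "right",
--             "E": "left"
--         },
--         "N": {
--             "E": "right",
--             "W": "left"
--         },
--     }
--
--     for i in range(len(path) - 1):
--         route[-1].append(path[i])
--         if path[i] != path[i + 1]:
--             route_turn.append(path[i + 1])
--             route.append([])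
--
--     time = 0
--     for r in range(len(route_turn) - 1):
--         distance = len(route[r])
--         now = route_turn[r]
--         nxt = route_turn[r + 1]
--         if distance <= 5:
--             answer.append(f"Time {time}: Go straight {distance}00m and turn {d_map[now][nxt]}")
--
--         else:
--             answer.append(f"Time {time + distance - 5}: Go straight 500m and turn {d_map[now][nxt]}")
--         time += distance
--
--     return answer
-- ===== SOURCE B (Python) =====
-- def solution(path):
--     d_map = {
--         "E": {"S": "right", "N": "left"},
--         "W": {"N": "right", "S": "left"},
--         "S": {"W": "right", "E": "left"},
--         "N": {"E": "right", "W": "left"},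
--     }
--     answer = []
--     time = 0
--     cnt = 0
--     # single fused pass: no intermediate route / route_turn lists
--     for i in range(len(path) - 1):
--         cnt += 1
--         if path[i] != path[i + 1]:
--             turn = d_map[path[i]][path[i + 1]]
--             if cnt <= 5:
--                 answer.append(f"Time {time}: Go straight {cnt}00m and turn {turn}")
--             else:
--                 answer.append(f"Time {time + cnt - 5}: Go straight 500m and turn {turn}")
--             time += cnt
--             cnt = 0
--     return answer
-- ===== Notes on version B (the rewrite author's own statement) =====
-- stated objective: simpler
-- what changed: B replaces A's two-phase algorithm (build route run-lists and route_turn, then a second indexed loop over them) with one fused pass over adjacent pairs that keeps only a run-length counter and running time and emits each formatted line the moment a direction change is seen.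
import Mathlib
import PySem

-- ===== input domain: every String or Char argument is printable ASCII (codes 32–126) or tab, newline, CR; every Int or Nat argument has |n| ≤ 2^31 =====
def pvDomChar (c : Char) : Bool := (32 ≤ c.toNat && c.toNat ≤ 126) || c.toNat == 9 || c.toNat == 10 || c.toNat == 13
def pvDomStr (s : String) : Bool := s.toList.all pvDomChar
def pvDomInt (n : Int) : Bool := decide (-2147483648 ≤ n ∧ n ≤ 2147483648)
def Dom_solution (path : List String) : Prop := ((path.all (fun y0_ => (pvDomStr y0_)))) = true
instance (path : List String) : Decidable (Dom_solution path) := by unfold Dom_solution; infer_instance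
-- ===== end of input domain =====

-- B is one fused pass (run counter + running time, emit at each change) instead of A's
-- two phases over intermediate route/route_turn lists; same objective cost, simpler code.

-- ===== PORT A =====
-- the nested dict literal d_map
def dmapA : PySem.Dict String (PySem.Dict String String) :=
  PySem.Dict.ofList
    [ ("E", PySem.Dict.ofList [("S", "right"), ("N", "left")])
    , ("W", PySem.Dict.ofList [("N", "right"), ("S", "left")])
    , ("S", PySem.Dict.ofList [("W", "right"), ("E", "left")])
    , ("N", PySem.Dict.ofList [("E", "right"), ("W", "left")]) ]

-- d_map[now][nxt]; a missing key is a Python KeyError, excluded by Pre_solution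
def dmapGetA (now nxt : String) : String :=
  PySem.Dict.getD (PySem.Dict.getD dmapA now PySem.Dict.empty) nxt ""

-- route[-1].append(x)  (route is nonempty throughout A's first loop)
def appendLastA (route : List (List String)) (x : String) : List (List String) :=
  match route with
  | [] => []
  | [r] => [r ++ [x]]
  | r :: rs => r :: appendLastA rs x

-- first loop: for i in range(len(path)-1), reading path[i], path[i+1] — structural
-- recursion over the list of adjacent pairs, same state (route, route_turn)
def phase1A : List String → List (List String) → List String → List (List String) × List String
  | a :: b :: rest, route, route_turn =>
      let route' := appendLastA route a
      if a ≠ b then phase1A (b :: rest) (route' ++ [[]]) (route_turn ++ [b])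
      else phase1A (b :: rest) route' route_turn
  | _, route, route_turn => (route, route_turn)

-- the f-string of A's second loop
def emitA (time : Int) (distance : Int) (now nxt : String) : String :=
  if distance ≤ 5 then
    "Time " ++ PySem.Int.toStr time ++ ": Go straight " ++ PySem.Int.toStr distance ++
      "00m and turn " ++ dmapGetA now nxt
  else
    "Time " ++ PySem.Int.toStr (time + distance - 5) ++ ": Go straight 500m and turn " ++
      dmapGetA now nxt

-- second loop: for r in range(len(route_turn)-1), reading route[r], route_turn[r],
-- route_turn[r+1]; route and route_turn always have equal length, so this is the
-- lockstep structural recursion over both lists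
def phase2A : List (List String) → List String → Int → List String
  | d :: ds, t1 :: t2 :: ts, time =>
      emitA time (d.length : Int) t1 t2 :: phase2A ds (t2 :: ts) (time + (d.length : Int))
  | _, _, _ => []

def solution (path : List String) : List String :=
  match path with
  | [] => []          -- Python raises IndexError at path[0]; excluded by Pre_solution
  | p0 :: _ =>
      let rt := phase1A path [[]] [p0]
      phase2A rt.1 rt.2 0

-- ===== PORT B =====
def dmapB : PySem.Dict String (PySem.Dict String String) :=
  PySem.Dict.ofList
    [ ("E", PySem.Dict.ofList [("S", "right"), ("N", "left")])
    , ("W", PySem.Dict.ofList [("N", "right"), ("S", "left")])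
    , ("S", PySem.Dict.ofList [("W", "right"), ("E", "left")])
    , ("N", PySem.Dict.ofList [("E", "right"), ("W", "left")]) ]

-- B's single loop over adjacent pairs, state (time, cnt); answer built by the recursion
def goB : List String → Int → Int → List String
  | a :: b :: rest, time, cnt =>
      let cnt' := cnt + 1
      if a ≠ b then
        let turn := PySem.Dict.getD (PySem.Dict.getD dmapB a PySem.Dict.empty) b ""
        (if cnt' ≤ 5 then
           "Time " ++ PySem.Int.toStr time ++ ": Go straight " ++ PySem.Int.toStr cnt' ++
             "00m and turn " ++ turn
         else
           "Time " ++ PySem.Int.toStr (time + cnt' - 5) ++ ": Go straight 500m and turn " ++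
             turn) :: goB (b :: rest) (time + cnt') 0
      else goB (b :: rest) time cnt'
  | _, _, _ => []

def solution_alt (path : List String) : List String := goB path 0 0

-- ===== PRECONDITION & SPEC =====
-- a valid d_map turn (any other differing adjacent pair makes Python's d_map[now][nxt] raise KeyError)
def validTurn (a b : String) : Prop :=
  (a, b) ∈ [("E","S"),("E","N"),("W","N"),("W","S"),("S","W"),("S","E"),("N","E"),("N","W")]

-- exactly where Python A returns: nonempty path (else IndexError on path[0]) and every
-- adjacent direction change is a key of d_map (else KeyError)
def Pre_solution (path : List String) : Prop :=
  path ≠ [] ∧ List.IsChain (fun a b => a ≠ b → validTurn a b) path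

instance (path : List String) : Decidable (Pre_solution path) := by
  unfold Pre_solution validTurn; infer_instance

def pvWitness_solution : List String := ["E","E","E","E","E","E","S","S","S"]

def Spec_solution (path : List String) (out : List String) : Prop := out = solution_alt path
instance (path : List String) (out : List String) : Decidable (Spec_solution path out) := by unfold Spec_solution; infer_instance

-- ===== CLAIM (what is proved, stated in full; the proofs are below) =====
def Claim_equal_solution : Prop := ∀ (path : List String), Dom_solution path → Pre_solution path → Spec_solution path (solution path)

-- ===== LEMMAS AND PROOFS =====

lemma appendLastA_ne_nil (r : List (List String)) (x : String) (h : r ≠ []) :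
    appendLastA r x ≠ [] := by
  cases r with
  | nil => exact absurd rfl h
  | cons a rs => cases rs <;> simp [appendLastA]

lemma appendLastA_prefix (d : List (List String)) (r : List (List String)) (x : String)
    (h : r ≠ []) : appendLastA (d ++ r) x = d ++ appendLastA r x := by
  induction d with
  | nil => rfl
  | cons a d ih =>
      cases r with
      | nil => exact absurd rfl h
      | cons b rs =>
          cases d with
          | nil => simp [appendLastA]
          | cons c ds => simpa [appendLastA] using ih

-- phase1A only edits the last run and appends at the ends: a frozen prefix of both
-- accumulators passes through untouched
lemma phase1A_prefix (l : List String) :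
    ∀ (d : List (List String)) (td : List String) (r : List (List String)) (ts : List String),
      r ≠ [] →
      phase1A l (d ++ r) (td ++ ts) =
        (d ++ (phase1A l r ts).1, td ++ (phase1A l r ts).2) := by
  induction l with
  | nil => intro d td r ts hr; simp [phase1A]
  | cons a l ih =>
      intro d td r ts hr
      cases l with
      | nil => simp [phase1A]
      | cons b rest =>
          simp only [phase1A, appendLastA_prefix d r a hr]
          by_cases hab : a = b
          · subst hab
            simp only [ne_eq, not_true_eq_false, if_false]
            exact ih d td (appendLastA r a) ts (appendLastA_ne_nil r a hr)
          · simp only [ne_eq, hab, not_false_eq_true, if_pos]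
            rw [List.append_assoc d, List.append_assoc td]
            exact ih d td (appendLastA r a ++ [[]]) (ts ++ [b]) (by simp)

lemma phase1A_turns_extend (l : List String) (r : List (List String)) (ts : List String)
    (hr : r ≠ []) : ∃ ex, (phase1A l r ts).2 = ts ++ ex := by
  have h := phase1A_prefix l [] ts r [] hr
  simp only [List.nil_append, List.append_nil] at h
  exact ⟨(phase1A l r []).2, by rw [h]⟩

-- emitA is B's f-string when now is the current run's direction
lemma emitA_eq (time cnt : Int) (a b : String) :
    emitA time cnt a b =
      (if cnt ≤ 5 then
         "Time " ++ PySem.Int.toStr time ++ ": Go straight " ++ PySem.Int.toStr cnt ++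
           "00m and turn " ++ PySem.Dict.getD (PySem.Dict.getD dmapB a PySem.Dict.empty) b ""
       else
         "Time " ++ PySem.Int.toStr (time + cnt - 5) ++ ": Go straight 500m and turn " ++
           PySem.Dict.getD (PySem.Dict.getD dmapB a PySem.Dict.empty) b "") := by
  simp [emitA, dmapGetA, dmapA, dmapB]

-- the main invariant: from a state with current run `cur` (its direction = the head of
-- the remaining path), A's finish-then-format equals B's fused emission
lemma mainA (l : List String) :
    ∀ (t : String) (cur : List String) (time : Int),
      (∀ a, l.head? = some a → a = t) →
      phase2A (phase1A l [cur] [t]).1 (phase1A l [cur] [t]).2 time =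
        goB l time (cur.length : Int) := by
  induction l with
  | nil => intro t cur time _; simp [phase1A, phase2A, goB]
  | cons a l ih =>
      intro t cur time hh
      have ha : a = t := hh a rfl
      cases l with
      | nil => simp [phase1A, phase2A, goB]
      | cons b rest =>
          simp only [phase1A, appendLastA, goB]
          by_cases hab : a = b
          · subst hab
            simp only [ne_eq, not_true_eq_false, if_false]
            have := ih t (cur ++ [a]) time (by intro x hx; rw [List.head?_cons] at hx; cases hx; exact ha)
            simpa using this
          · simp only [ne_eq, hab, not_false_eq_true, if_pos]
            have hpre := phase1A_prefix (b :: rest) [cur ++ [a]] [t] [[]] [b] (by simp)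
            simp only [List.cons_append, List.nil_append] at hpre
            simp only [List.singleton_append]
            rw [hpre]
            obtain ⟨ex, hex⟩ := phase1A_turns_extend (b :: rest) [[]] [b] (by simp)
            rw [hex]
            simp only [List.cons_append, List.nil_append, phase2A]
            rw [emitA_eq, ha]
            have hrec := ih b [] (time + ((cur.length : Int) + 1))
              (by intro x hx; rw [List.head?_cons] at hx; exact (Option.some.inj hx).symm)
            rw [hex] at hrec
            simp only [List.length_nil, Nat.cast_zero, List.singleton_append] at hrec
            simp only [List.length_append, List.length_cons, List.length_nil,
              Nat.cast_add, Nat.cast_one, Nat.cast_zero, zero_add]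
            rw [hrec]

-- ===== VERDICT (by name: the statement is the Claim_ definition above) =====
theorem solution_spec : Claim_equal_solution := by
  intro path _ hpre
  unfold Spec_solution
  cases path with
  | nil => exact absurd rfl hpre.1
  | cons p0 rest =>
      show (let rt := phase1A (p0 :: rest) [[]] [p0]; phase2A rt.1 rt.2 0) = goB (p0 :: rest) 0 0
      simpa using mainA (p0 :: rest) p0 [] 0
        (by intro x hx; rw [List.head?_cons] at hx; exact (Option.some.inj hx).symm)
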